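-- pv_equiv track=rewrite | github.com/olppaemi/algo | UVa/Data Structures/UVa_10616_Divisible_Group_Sums.py | solution
-- ===== SOURCE A (Python) =====
-- def solution(n, m, d, num):
--     table = [[[-1 for _ in range(d)] for _ in range(m)] for _ in range(n)]
--
--     def dfs(idx, cnt, sum):
--         if cnt == m:
--             if sum == 0:
--                 return 1
--             return 0
--         if idx >= n:
--             return 0
--
--         if table[idx][cnt][sum] >= 0:
--             return table[idx][cnt][sum]
--
--         temp = (sum + num[idx]) % d
--         if temp < 0:
--             temp += d
--
--         not_skip = dfs(idx + 1, cnt + 1, temp)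
--         skip = dfs(idx + 1, cnt, sum % d)
--
--         table[idx][cnt][sum] = not_skip + skip
--         return table[idx][cnt][sum]
--
--     return dfs(0, 0, 0)
-- ===== SOURCE B (Python) =====
-- def solution(n, m, d, num):
--     # Bottom-up DP over the first n numbers: dp maps (count, residue) -> number of ways.
--     dp = {(0, 0): 1}
--     for i in range(n):
--         x = num[i]
--         ndp = dict(dp)
--         for (c, r), v in dp.items():
--             if c < m:
--                 key = (c + 1, (r + x) % d)
--                 ndp[key] = ndp.get(key, 0) + v
--         dp = ndp
--     return dp.get((m, 0), 0)
-- ===== Notes on version B (the rewrite author's own statement) =====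
-- stated objective: alternative
-- what changed: Replaces the top-down memoized recursion over (index, count, residue) with a bottom-up dynamic program folding over the first n numbers and maintaining a dictionary mapping (count, residue) to the number of subsets; no recursion, and only reachable states are stored instead of preallocating the full n*m*d memo table.
-- outside the precondition, e.g. on solution(5, 0, 1, []): A returns 1, B raises IndexError
import Mathlib
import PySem

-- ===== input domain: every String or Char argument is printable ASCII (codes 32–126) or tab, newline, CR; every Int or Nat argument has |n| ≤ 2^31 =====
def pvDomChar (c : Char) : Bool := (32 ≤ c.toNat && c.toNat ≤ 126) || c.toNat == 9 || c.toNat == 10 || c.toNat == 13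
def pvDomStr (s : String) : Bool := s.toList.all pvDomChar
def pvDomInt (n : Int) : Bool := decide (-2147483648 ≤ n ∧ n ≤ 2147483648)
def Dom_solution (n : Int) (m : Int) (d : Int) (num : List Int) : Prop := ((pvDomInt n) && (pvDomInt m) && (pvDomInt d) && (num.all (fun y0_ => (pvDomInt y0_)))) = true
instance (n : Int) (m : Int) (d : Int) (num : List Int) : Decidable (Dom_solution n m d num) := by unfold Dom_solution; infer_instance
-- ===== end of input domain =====

-- B replaces A's top-down memoized recursion by a bottom-up dictionary DP over (count, residue) states.
-- A mutates its local memo table only; the return value is what is compared.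


-- ===== PORT A =====
-- A's mutable 3D memo list table[idx][cnt][sum] is modelled as a function Int → Int → Int → Int
-- (same reads, same writes, same -1 sentinel); under Pre_ every access A makes is in range.

def dfsA (n : Int) (m : Int) (d : Int) (num : List Int)
    (table : Int → Int → Int → Int) (idx : Int) (cnt : Int) (sum : Int) :
    Int × (Int → Int → Int → Int) :=
  if cnt = m then (if sum = 0 then 1 else 0, table)
  else if _h : idx ≥ n then (0, table)
  else if table idx cnt sum ≥ 0 then (table idx cnt sum, table)
  else
    let temp0 := PySem.Int.mod (sum + (PySem.List.pyGet? num idx).getD 0) d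
    let temp := if temp0 < 0 then temp0 + d else temp0
    let r1 := dfsA n m d num table (idx + 1) (cnt + 1) temp
    let r2 := dfsA n m d num r1.2 (idx + 1) cnt (PySem.Int.mod sum d)
    let v := r1.1 + r2.1
    (v, fun i c s => if i = idx ∧ c = cnt ∧ s = sum then v else r2.2 i c s)
termination_by (n - idx).toNat
decreasing_by all_goals omega


def solution (n : Int) (m : Int) (d : Int) (num : List Int) : Int :=
  (dfsA n m d num (fun _ _ _ => -1) 0 0 0).1

-- ===== PORT B =====
def solution_alt (n : Int) (m : Int) (d : Int) (num : List Int) : Int :=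
  let dp0 : PySem.Dict (Int × Int) Int := PySem.Dict.empty.insert (0, 0) 1
  let dp := (PySem.List.pyRange 0 n 1).foldl (fun dp i =>
      let x := (PySem.List.pyGet? num i).getD 0
      let ndp := dp     -- ndp = dict(dp)
      dp.items.foldl (fun ndp kv =>
        if kv.1.1 < m then
          let key : Int × Int := (kv.1.1 + 1, PySem.Int.mod (kv.1.2 + x) d)
          ndp.insert key (ndp.getD key 0 + kv.2)
        else ndp) ndp) dp0
  dp.getD (m, 0) 0

-- ===== PRECONDITION & SPEC =====
-- Pre_ keeps A's natural returning domain: it excludes the inputs where A raises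
-- (0 < n together with d ≤ 0, m ≤ 0 or n > len(num) hits an empty memo row or num[idx] out of
-- range), and the malformed inputs with n > len(num) and m = 0, where A returns 1 without ever
-- touching num while B's loop indexes num[i] and raises (n is the count of supplied numbers).
def Pre_solution (n : Int) (m : Int) (d : Int) (num : List Int) : Prop :=
  n ≤ num.length ∧ (m = 0 ∨ n ≤ 0 ∨ (0 < d ∧ 0 < m))
instance (n : Int) (m : Int) (d : Int) (num : List Int) : Decidable (Pre_solution n m d num) := by
  unfold Pre_solution; infer_instance

def pvWitness_solution : Int × Int × Int × List Int := (4, 2, 3, [1, 2, 4, 5])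

def Spec_solution (n : Int) (m : Int) (d : Int) (num : List Int) (out : Int) : Prop := out = solution_alt n m d num
instance (n : Int) (m : Int) (d : Int) (num : List Int) (out : Int) : Decidable (Spec_solution n m d num out) := by unfold Spec_solution; infer_instance

-- ===== CLAIM (what is proved, stated in full; the proofs are below) =====
def Claim_equal_solution : Prop := ∀ (n : Int) (m : Int) (d : Int) (num : List Int), Dom_solution n m d num → Pre_solution n m d num → Spec_solution n m d num (solution n m d num)

-- ===== LEMMAS AND PROOFS =====
def dfsP (n : Int) (m : Int) (d : Int) (num : List Int) (idx : Int) (cnt : Int) (sum : Int) : Int :=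
  if cnt = m then (if sum = 0 then 1 else 0)
  else if _h : idx ≥ n then 0
  else
    let temp0 := PySem.Int.mod (sum + (PySem.List.pyGet? num idx).getD 0) d
    let temp := if temp0 < 0 then temp0 + d else temp0
    dfsP n m d num (idx + 1) (cnt + 1) temp + dfsP n m d num (idx + 1) cnt (PySem.Int.mod sum d)
termination_by (n - idx).toNat
decreasing_by all_goals omega



def cntk (d : Int) (l : List Int) (k : Nat) (t : Int) : Int :=
  match k, l with
  | 0, _ => if t = 0 then 1 else 0
  | _ + 1, [] => 0
  | k + 1, x :: l => cntk d l (k + 1) t + cntk d l k ((t - x) % d)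

theorem cntk_zero (d : Int) (l : List Int) (t : Int) :
    cntk d l 0 t = if t = 0 then 1 else 0 := by cases l <;> rfl

theorem emod_sub (d a b : Int) : (a % d - b) % d = (a - b) % d := by
  rw [Int.sub_eq_add_neg, Int.emod_add_emod, ← Int.sub_eq_add_neg]

theorem cntk_snoc_succ (d : Int) (l : List Int) (x t : Int) (k : Nat) :
    cntk d (l ++ [x]) (k + 1) t = cntk d l (k + 1) t + cntk d l k ((t - x) % d) := by
  induction l generalizing k t with
  | nil => rfl
  | cons y l ih =>
    show cntk d (l ++ [x]) (k + 1) t + cntk d (l ++ [x]) k ((t - y) % d) = _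
    cases k with
    | zero =>
      rw [ih]
      show _ = cntk d (y :: l) 1 t + cntk d (y :: l) 0 ((t - x) % d)
      rw [show cntk d (y :: l) 1 t = cntk d l 1 t + cntk d l 0 ((t - y) % d) from rfl,
        cntk_zero, cntk_zero, cntk_zero, cntk_zero]
      ring
    | succ k' =>
      rw [ih, ih]
      have swap : ((t - y) % d - x) % d = ((t - x) % d - y) % d := by
        rw [emod_sub, emod_sub]; ring_nf
      show _ = (cntk d l (k' + 2) t + cntk d l (k' + 1) ((t - y) % d)) +
        (cntk d l (k' + 1) ((t - x) % d) + cntk d l k' (((t - x) % d - y) % d))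
      rw [← swap]; ring

-- the inner loop of B, over an arbitrary entry list
def stepB (m d x : Int) (ndp : PySem.Dict (Int × Int) Int) (kv : (Int × Int) × Int) :
    PySem.Dict (Int × Int) Int :=
  if kv.1.1 < m then
    ndp.insert (kv.1.1 + 1, PySem.Int.mod (kv.1.2 + x) d)
      ((ndp.getD (kv.1.1 + 1, PySem.Int.mod (kv.1.2 + x) d) 0) + kv.2)
  else ndp

theorem foldB_getD (m d x : Int) (L : List ((Int × Int) × Int))
    (acc : PySem.Dict (Int × Int) Int) (q : Int × Int) :
    (L.foldl (stepB m d x) acc).getD q 0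
      = acc.getD q 0 +
        ((L.filter (fun kv => decide (kv.1.1 < m) &&
            ((kv.1.1 + 1, PySem.Int.mod (kv.1.2 + x) d) == q))).map (·.2)).sum := by
  induction L generalizing acc with
  | nil => simp
  | cons kv L ih =>
    rw [List.foldl_cons, ih, List.filter_cons]
    by_cases hlt : kv.1.1 < m
    · have hs : stepB m d x acc kv
          = acc.insert (kv.1.1 + 1, PySem.Int.mod (kv.1.2 + x) d)
              ((acc.getD (kv.1.1 + 1, PySem.Int.mod (kv.1.2 + x) d) 0) + kv.2) := by
        simp [stepB, hlt]
      by_cases hq : (kv.1.1 + 1, PySem.Int.mod (kv.1.2 + x) d) = q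
      · rw [hs, ← hq, PySem.Dict.getD_insert_self]
        simp [hlt, hq]
        ring
      · rw [hs, PySem.Dict.getD_insert_of_ne]
        · simp [hlt, hq]
        · exact fun h => hq h.symm
    · have hs : stepB m d x acc kv = acc := by simp [stepB, hlt]
      rw [hs]
      simp [hlt]

theorem sum_filter_key (l : List ((Int × Int) × Int)) (K : Int × Int)
    (hnd : (l.map (·.1)).Nodup) :
    ((l.filter (fun kv => kv.1 == K)).map (·.2)).sum = (PySem.Dict.mk l).getD K 0 := by
  induction l with
  | nil => rfl
  | cons kv l ih =>
    rw [List.filter_cons]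
    by_cases hk : kv.1 = K
    · have hnotin : ∀ p ∈ l, ¬(p.1 == K) = true := by
        intro p hp
        simp only [List.map_cons, List.nodup_cons] at hnd
        simp only [beq_iff_eq]
        intro h; exact hnd.1 (by rw [hk, ← h]; exact List.mem_map_of_mem hp)
      rw [List.filter_eq_nil_iff.mpr hnotin]
      have : (PySem.Dict.mk (kv :: l)).getD K 0 = kv.2 := by
        rw [PySem.Dict.getD_eq_get?_getD]
        rw [show (PySem.Dict.mk (kv :: l)) = (PySem.Dict.mk ((kv.1, kv.2) :: l)) by rfl]
        rw [PySem.Dict.get?_mk_cons]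
        simp [hk]
      simp [hk, this]
    · have : (PySem.Dict.mk (kv :: l)).getD K 0 = (PySem.Dict.mk l).getD K 0 := by
        rw [PySem.Dict.getD_eq_get?_getD, PySem.Dict.getD_eq_get?_getD]
        rw [show (PySem.Dict.mk (kv :: l)) = (PySem.Dict.mk ((kv.1, kv.2) :: l)) by rfl]
        rw [PySem.Dict.get?_mk_cons]
        simp [hk]
      rw [this, ← ih (by simp only [List.map_cons, List.nodup_cons] at hnd; exact hnd.2)]
      simp [hk]

theorem stepAll_getD (m d x : Int) (dp : PySem.Dict (Int × Int) Int)
    (hd : 0 < d) (hnd : dp.keys.Nodup)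
    (hb : ∀ kv ∈ dp.items, 0 ≤ kv.1.1 ∧ kv.1.1 ≤ m ∧ 0 ≤ kv.1.2 ∧ kv.1.2 < d)
    (c r : Int) (hc0 : 0 ≤ c) (hcm : c ≤ m) (hr0 : 0 ≤ r) (hrd : r < d) :
    (dp.items.foldl (stepB m d x) dp).getD (c, r) 0
      = dp.getD (c, r) 0 + (if 1 ≤ c then dp.getD (c - 1, (r - x) % d) 0 else 0) := by
  rw [foldB_getD]
  congr 1
  by_cases hc1 : 1 ≤ c
  · rw [if_pos hc1]
    rw [List.filter_congr (q := fun kv => kv.1 == ((c - 1 : Int), (r - x) % d)) ?_]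
    · have : (dp.items.map (fun p => p.1)).Nodup := hnd
      have h := sum_filter_key dp.items ((c - 1 : Int), (r - x) % d) this
      simpa using h
    · intro kv hkv
      obtain ⟨h1, h2, h3, h4⟩ := hb kv hkv
      rw [PySem.Int.mod_eq_emod_of_pos hd]
      rw [Bool.eq_iff_iff]
      simp only [Bool.and_eq_true, decide_eq_true_eq, beq_iff_eq, Prod.ext_iff]
      constructor
      · rintro ⟨hlt, hcc, hrr⟩
        refine ⟨by omega, ?_⟩
        rw [← hrr, emod_sub]
        have : kv.1.2 + x - x = kv.1.2 := by ring
        rw [this, Int.emod_eq_of_lt h3 h4]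
      · rintro ⟨hcc, hrr⟩
        refine ⟨by omega, by omega, ?_⟩
        rw [hrr, Int.sub_eq_add_neg, Int.emod_add_emod]
        have : r + -x + x = r := by ring
        rw [this, Int.emod_eq_of_lt hr0 hrd]
  · rw [if_neg hc1]
    rw [List.filter_eq_nil_iff.mpr ?_]
    · simp
    · intro kv hkv
      obtain ⟨h1, h2, h3, h4⟩ := hb kv hkv
      simp only [Bool.and_eq_true, decide_eq_true_eq, beq_iff_eq, Prod.ext_iff, not_and]
      intro hlt hcc
      exfalso; omega

theorem foldB_id (m d x : Int) (L : List ((Int × Int) × Int))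
    (acc : PySem.Dict (Int × Int) Int) (h : ∀ kv ∈ L, ¬ kv.1.1 < m) :
    L.foldl (stepB m d x) acc = acc := by
  induction L generalizing acc with
  | nil => rfl
  | cons kv L ih =>
    rw [List.foldl_cons, show stepB m d x acc kv = acc by
      simp [stepB, h kv (by simp)]]
    exact ih acc (fun p hp => h p (by simp [hp]))

theorem foldB_nodup (m d x : Int) (L : List ((Int × Int) × Int))
    (acc : PySem.Dict (Int × Int) Int) (h : acc.keys.Nodup) :
    (L.foldl (stepB m d x) acc).keys.Nodup := by
  induction L generalizing acc with
  | nil => exact h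
  | cons kv L ih =>
    rw [List.foldl_cons]
    apply ih
    by_cases hlt : kv.1.1 < m
    · rw [show stepB m d x acc kv = acc.insert (kv.1.1 + 1, PySem.Int.mod (kv.1.2 + x) d)
          ((acc.getD (kv.1.1 + 1, PySem.Int.mod (kv.1.2 + x) d) 0) + kv.2) by simp [stepB, hlt]]
      exact PySem.Dict.nodup_keys_insert _ _ _ h
    · rw [show stepB m d x acc kv = acc by simp [stepB, hlt]]
      exact h

theorem foldB_bounds (m d x : Int) (hd : 0 < d) (L : List ((Int × Int) × Int))
    (acc : PySem.Dict (Int × Int) Int)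
    (hL : ∀ kv ∈ L, 0 ≤ kv.1.1)
    (hacc : ∀ kv ∈ acc.items, 0 ≤ kv.1.1 ∧ kv.1.1 ≤ m ∧ 0 ≤ kv.1.2 ∧ kv.1.2 < d) :
    ∀ kv ∈ (L.foldl (stepB m d x) acc).items,
      0 ≤ kv.1.1 ∧ kv.1.1 ≤ m ∧ 0 ≤ kv.1.2 ∧ kv.1.2 < d := by
  induction L generalizing acc with
  | nil => exact hacc
  | cons kv L ih =>
    rw [List.foldl_cons]
    apply ih
    · exact fun p hp => hL p (by simp [hp])
    · by_cases hlt : kv.1.1 < m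
      · rw [show stepB m d x acc kv = acc.insert (kv.1.1 + 1, PySem.Int.mod (kv.1.2 + x) d)
            ((acc.getD (kv.1.1 + 1, PySem.Int.mod (kv.1.2 + x) d) 0) + kv.2) by simp [stepB, hlt]]
        intro p hp
        rcases (PySem.Dict.mem_items_insert _ _ _ _).mp hp with h1 | h1
        · subst h1
          have h0 := hL kv (by simp)
          refine ⟨by simpa using by omega, by simpa using by omega, ?_, ?_⟩
          · simpa [PySem.Int.mod_eq_emod_of_pos hd] using Int.emod_nonneg _ (by omega)
          · simpa [PySem.Int.mod_eq_emod_of_pos hd] using Int.emod_lt_of_pos _ hd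
        · exact hacc p h1.1
      · rw [show stepB m d x acc kv = acc by simp [stepB, hlt]]
        exact hacc

def dpInit : PySem.Dict (Int × Int) Int := PySem.Dict.empty.insert (0, 0) 1

def outerB (m d : Int) (num : List Int) (dp : PySem.Dict (Int × Int) Int) (i : Int) :
    PySem.Dict (Int × Int) Int :=
  dp.items.foldl (stepB m d ((PySem.List.pyGet? num i).getD 0)) dp

theorem alt_eq (n m d : Int) (num : List Int) :
    solution_alt n m d num
      = ((PySem.List.pyRange 0 n 1).foldl (outerB m d num) dpInit).getD (m, 0) 0 := rfl

def RepB (m d : Int) (num : List Int) (i : Nat) (dp : PySem.Dict (Int × Int) Int) : Prop :=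
  dp.keys.Nodup ∧
  (∀ kv ∈ dp.items, 0 ≤ kv.1.1 ∧ kv.1.1 ≤ m ∧ 0 ≤ kv.1.2 ∧ kv.1.2 < d) ∧
  ∀ c r : Int, 0 ≤ c → c ≤ m → 0 ≤ r → r < d →
    dp.getD (c, r) 0 = cntk d (num.take i) c.toNat r

theorem rep_init (m d : Int) (num : List Int) (hd : 0 < d) (hm : 0 ≤ m) :
    RepB m d num 0 dpInit := by
  refine ⟨by decide, ?_, ?_⟩
  · intro kv hkv
    have : kv = ((0, 0), 1) := by
      have hit : dpInit.items = [((0, 0), 1)] := rfl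
      rw [hit] at hkv
      simpa using hkv
    rw [this]
    exact ⟨le_refl _, hm, le_refl _, hd⟩
  · intro c r hc0 hcm hr0 hrd
    have hg : dpInit.getD (c, r) 0 = if (c, r) = ((0 : Int), (0 : Int)) then 1 else 0 := by
      rw [dpInit, PySem.Dict.getD_insert]
      split_ifs <;> rfl
    rw [hg, List.take_zero]
    rcases Int.lt_or_le c 1 with hc | hc
    · have : c = 0 := by omega
      subst this
      rw [show (0 : Int).toNat = 0 from rfl, cntk_zero]
      simp [Prod.ext_iff]
    · have : c.toNat = (c.toNat - 1) + 1 := by omega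
      rw [this, show cntk d [] (c.toNat - 1 + 1) r = 0 from rfl]
      rw [if_neg (by simp [Prod.ext_iff]; omega)]

theorem rep_step (m d : Int) (num : List Int) (hd : 0 < d)
    (i : Nat) (hi : i < num.length) (dp : PySem.Dict (Int × Int) Int)
    (h : RepB m d num i dp) :
    RepB m d num (i + 1) (outerB m d num dp (i : Int)) := by
  obtain ⟨hnd, hb, hv⟩ := h
  have hx : (PySem.List.pyGet? num (i : Int)).getD 0 = num[i]'hi := by
    show PySem.List.pyGetD num (i : Int) 0 = _
    rw [PySem.List.pyGetD_eq_getElem] <;> simp [hi]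
  have htake : num.take (i + 1) = num.take i ++ [num[i]'hi] := by
    rw [List.take_succ, List.getElem?_eq_getElem hi]
    rfl
  refine ⟨?_, ?_, ?_⟩
  · exact foldB_nodup _ _ _ _ _ hnd
  · exact foldB_bounds _ _ _ hd _ _ (fun kv hkv => (hb kv hkv).1) hb
  · intro c r hc0 hcm hr0 hrd
    rw [outerB, stepAll_getD m d _ dp hd hnd hb c r hc0 hcm hr0 hrd, htake, hx]
    rcases Int.lt_or_le c 1 with hc | hc
    · have hc' : c = 0 := by omega
      subst hc'
      rw [if_neg (by omega), hv 0 r le_rfl hcm hr0 hrd]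
      rw [show (0 : Int).toNat = 0 from rfl, cntk_zero, cntk_zero]
      ring
    · have hcn : c.toNat = (c - 1).toNat + 1 := by omega
      rw [if_pos hc, hcn, cntk_snoc_succ]
      rw [hv c r hc0 hcm hr0 hrd,
        hv (c - 1) ((r - num[i]'hi) % d) (by omega) (by omega)
          (Int.emod_nonneg _ (by omega)) (Int.emod_lt_of_pos _ hd), hcn]

theorem rep_all (m d : Int) (num : List Int) (hd : 0 < d) (hm : 0 ≤ m)
    (i : Nat) (hi : i ≤ num.length) :
    RepB m d num i ((PySem.List.pyRange 0 (i : Int) 1).foldl (outerB m d num) dpInit) := by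
  induction i with
  | zero =>
    rw [PySem.List.pyRange_one_eq_nil (by omega)]
    exact rep_init m d num hd hm
  | succ j ih =>
    have h1 : ((j + 1 : Nat) : Int) = (j : Int) + 1 := by push_cast; ring
    rw [h1, PySem.List.pyRange_one_succ_right (by omega), List.foldl_append]
    exact rep_step m d num hd j (by omega) _ (ih (by omega))

theorem alt_main (n m d : Int) (num : List Int) (hd : 0 < d) (hm : 0 ≤ m)
    (hn0 : 0 ≤ n) (hnl : n ≤ num.length) :
    solution_alt n m d num = cntk d (num.take n.toNat) m.toNat 0 := by
  rw [alt_eq]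
  have h := rep_all m d num hd hm n.toNat (by omega)
  rw [Int.toNat_of_nonneg hn0] at h
  exact h.2.2 m 0 hm le_rfl le_rfl hd

theorem fold_id_m_nonpos (m d : Int) (num : List Int) (hm : m ≤ 0) (L : List Int) :
    L.foldl (outerB m d num) dpInit = dpInit := by
  induction L with
  | nil => rfl
  | cons i L ih =>
    rw [List.foldl_cons, show outerB m d num dpInit i = dpInit from
      foldB_id _ _ _ _ _ (by
        intro kv hkv
        have hit : dpInit.items = [((0, 0), 1)] := rfl
        rw [hit] at hkv
        have : kv = ((0, 0), 1) := by simpa using hkv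
        rw [this]; simpa using by omega)]
    exact ih

theorem alt_m_zero (n d : Int) (num : List Int) : solution_alt n 0 d num = 1 := by
  rw [alt_eq, fold_id_m_nonpos 0 d num le_rfl]
  rfl

theorem alt_n_nonpos (n m d : Int) (num : List Int) (hn : n ≤ 0) (hm : m ≠ 0) :
    solution_alt n m d num = 0 := by
  rw [alt_eq, PySem.List.pyRange_one_eq_nil (by omega), List.foldl_nil]
  rw [dpInit, PySem.Dict.getD_insert, if_neg (by simp [Prod.ext_iff]; omega)]
  rfl

theorem neg_emod_emod (d a : Int) : (-(a % d)) % d = (-a) % d := by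
  conv_rhs => rw [show (-a) = -(a % d) - a / d * d by rw [Int.emod_def]; ring]
  rw [Int.sub_mul_emod_self_right]


theorem dfsA_correct (n m d : Int) (num : List Int) (table : Int → Int → Int → Int)
    (idx cnt sum : Int)
    (h : ∀ i c s, table i c s = -1 ∨ table i c s = dfsP n m d num i c s) :
    (dfsA n m d num table idx cnt sum).1 = dfsP n m d num idx cnt sum ∧
    (∀ i c s, (dfsA n m d num table idx cnt sum).2 i c s = -1 ∨
        (dfsA n m d num table idx cnt sum).2 i c s = dfsP n m d num i c s) := by
  fun_induction dfsA n m d num table idx cnt sum with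
  | case1 a b c =>
    refine ⟨?_, h⟩; rw [dfsP]; simp
  | case2 a b c e hc hn =>
    refine ⟨?_, h⟩; rw [dfsP]; simp [hc, hn]
  | case3 a b c e hc hn hge =>
    rcases h b c e with h1 | h1
    · omega
    · exact ⟨h1, h⟩
  | case4 a b c e hc hn hmiss t0 temp r1 r2 v ih3 ih2 ih1 =>
    obtain ⟨e1, v1⟩ := ih3 h
    obtain ⟨e2, v2⟩ := ih1 v1
    simp only [r1, temp, t0, dite_eq_ite] at e1 e2
    have hv : v = dfsP n m d num b c e := by
      rw [dfsP]; simp only [hc, hn]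
      simp [v, r1, r2, temp, t0]
      rw [e1, e2]
    refine ⟨hv, ?_⟩
    intro i c1 s
    by_cases hk : i = b ∧ c1 = c ∧ s = e
    · obtain ⟨rfl, rfl, rfl⟩ := hk
      right; simpa using hv
    · simpa [hk] using v2 i c1 s

theorem dfsP_eq_cntk (n m d : Int) (num : List Int) (idx cnt sum : Int)
    (hd : 0 < d) (hs0 : 0 ≤ sum) (hs1 : sum < d) (hc0 : 0 ≤ cnt) (hcm : cnt ≤ m)
    (hi : 0 ≤ idx) (hn : n ≤ num.length) :
    dfsP n m d num idx cnt sum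
      = cntk d ((num.take n.toNat).drop idx.toNat) (m - cnt).toNat ((-sum)% d) := by
  fun_induction dfsP n m d num idx cnt sum with
  | case1 b =>
    have h0 : (m - m).toNat = 0 := by omega
    rw [h0]; simp [cntk]
  | case2 b e hs =>
    have h0 : (m - m).toNat = 0 := by omega
    have h1 : (-e)% d = d - e := by
      rw [show -e = (d - e) + d * (-1) by ring, Int.add_mul_emod_self_left,
        Int.emod_eq_of_lt (by omega) (by omega)]
    rw [h0]; simp only [cntk]
    rw [if_neg (by omega)]
  | case3 b c e hc hge =>
    have hnil : List.drop b.toNat (List.take n.toNat num) = [] := by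
      apply List.drop_eq_nil_of_le
      rw [List.length_take]; omega
    have hk : (m - c).toNat = ((m - c).toNat - 1) + 1 := by omega
    rw [hnil, hk]; simp [cntk]
  | case4 b c e hc hge t0 temp ih2 ih1 =>
    have hlt : b.toNat < num.length := by omega
    have hx : (PySem.List.pyGet? num b).getD 0 = num[b.toNat]'hlt := by
      show PySem.List.pyGetD num b 0 = _
      rw [PySem.List.pyGetD_eq_getElem] <;> omega
    have ht0 : t0 = (e + num[b.toNat]'hlt)% d := by
      simp [t0, PySem.Int.mod_eq_emod_of_pos hd, hx]
    have ht0b : 0 ≤ t0 ∧ t0 < d := by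
      rw [ht0]; exact ⟨Int.emod_nonneg _ (by omega), Int.emod_lt_of_pos _ hd⟩
    have htemp : temp = t0 := by simp only [temp]; rw [dif_neg (by omega)]
    have hskip : PySem.Int.mod e d = e := by
      rw [PySem.Int.mod_eq_emod_of_pos hd, Int.emod_eq_of_lt hs0 hs1]
    have hsucc : (b + 1).toNat = b.toNat + 1 := by omega
    have IH2 := ih2 (by omega) (by omega) (by omega) (by omega) (by omega)
    have IH1 := ih1 (by rw [hskip]; omega) (by rw [hskip]; omega) hc0 hcm (by omega)
    rw [hskip] at IH1
    have hdrop : List.drop b.toNat (List.take n.toNat num)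
        = num[b.toNat]'hlt :: List.drop (b.toNat + 1) (List.take n.toNat num) := by
      rw [List.drop_eq_getElem_cons (by rw [List.length_take]; omega)]
      congr 1
      exact List.getElem_take
    have hk : (m - c).toNat = ((m - (c + 1)).toNat) + 1 := by omega
    have hres : ((-e)% d - num[b.toNat]'hlt)% d = (-temp)% d := by
      rw [htemp, ht0, neg_emod_emod, Int.sub_eq_add_neg, Int.emod_add_emod,
        show -e + -num[b.toNat]'hlt = -(e + num[b.toNat]'hlt) by ring]
    rw [hdrop, hk]; simp only [cntk]
    rw [hres, hskip, IH2, IH1, hsucc, hk]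
    ring

theorem sol_eq_dfsP (n m d : Int) (num : List Int) :
    solution n m d num = dfsP n m d num 0 0 0 :=
  (dfsA_correct n m d num (fun _ _ _ => -1) 0 0 0 (fun _ _ _ => Or.inl rfl)).1

theorem sol_m_zero (n d : Int) (num : List Int) : solution n 0 d num = 1 := by
  rw [sol_eq_dfsP, dfsP]
  simp

theorem sol_n_nonpos (n m d : Int) (num : List Int) (hn : n ≤ 0) (hm : m ≠ 0) :
    solution n m d num = 0 := by
  rw [sol_eq_dfsP, dfsP]
  rw [if_neg (fun h => hm h.symm), dif_pos (by omega)]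

-- ===== VERDICT (by name: the statement is the Claim_ definition above) =====
theorem solution_spec : Claim_equal_solution := by
  intro n m d num hdom hpre
  unfold Spec_solution
  obtain ⟨hnl, hcase⟩ := hpre
  by_cases hm : m = 0
  · subst hm
    rw [sol_m_zero, alt_m_zero]
  · by_cases hn : n ≤ 0
    · rw [sol_n_nonpos n m d num hn hm, alt_n_nonpos n m d num hn hm]
    · have hdm : 0 < d ∧ 0 < m := by
        rcases hcase with h | h | h
        · exact absurd h hm
        · exact absurd h hn
        · exact h
      obtain ⟨hd, hmp⟩ := hdm
      rw [sol_eq_dfsP,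
        dfsP_eq_cntk n m d num 0 0 0 hd le_rfl hd le_rfl (by omega) le_rfl hnl,
        alt_main n m d num hd (by omega) (by omega) hnl]
      norm_num
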